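-- pv_equiv track=rewrite | github.com/maeeri/tira | Wk7/maxheap.py | count
-- ===== SOURCE A (Python) =====
-- from math import floor, log2
--
-- def count(n):
--     counter = 0
--     full_lvls = floor(log2(n))
--     nodes_per_lvl = [2**i for i in range(full_lvls + 1)]
--     on_last_lvl = nodes_per_lvl[-1] - sum(nodes_per_lvl)%n
--
--     for i in range(full_lvls):
--         counter += i * nodes_per_lvl[i]
--
--     counter += full_lvls * on_last_lvl
--     return counter
-- ===== SOURCE B (Python) =====
-- def count(n):
--     m = n.bit_length() - 1
--     on_last_lvl = 2**m - (2**(m + 1) - 1) % n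
--     return (m - 2) * 2**m + 2 + m * on_last_lvl
-- ===== Notes on version B (the rewrite author's own statement) =====
-- stated objective: simpler
-- what changed: Replaces the per-level loop and the materialised [2**i ...] level list with the closed form sum_{i<m} i*2^i = (m-2)*2^m + 2 and bit_length for floor(log2), so B is three straight-line arithmetic expressions with no loop or list; Pre_ excludes n <= 0, where A's log2 raises ValueError.
import Mathlib
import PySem

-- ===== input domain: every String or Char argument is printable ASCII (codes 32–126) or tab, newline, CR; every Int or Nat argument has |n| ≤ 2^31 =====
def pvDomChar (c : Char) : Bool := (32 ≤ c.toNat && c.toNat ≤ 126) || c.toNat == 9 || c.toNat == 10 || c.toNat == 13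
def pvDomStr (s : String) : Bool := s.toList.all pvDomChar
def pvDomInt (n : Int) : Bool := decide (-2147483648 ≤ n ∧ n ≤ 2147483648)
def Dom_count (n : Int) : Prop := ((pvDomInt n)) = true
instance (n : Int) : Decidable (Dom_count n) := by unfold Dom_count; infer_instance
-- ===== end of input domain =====

-- B replaces A's per-level loop and level list with a closed-form arithmetic expression (objective: simpler).

-- ===== PORT A =====
-- floor(log2(n)) by repeated halving; exact for the integers 1 ≤ n ≤ 2^31 admitted by Dom_count,
-- on which math.log2 of an int is exact enough that floor(log2(n)) = n.bit_length() - 1.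
def pvFloorLog2 : Nat → Nat
  | 0 => 0
  | 1 => 0
  | n + 2 => pvFloorLog2 ((n + 2) / 2) + 1
decreasing_by exact Nat.div_lt_self (by omega) (by omega)

def count (n : Int) : Int :=
  let counter : Int := 0
  let full_lvls : Int := (pvFloorLog2 n.toNat : Int)
  -- [2**i for i in range(full_lvls + 1)]; i from the range is nonnegative, so 2**i = 2^i.toNat
  let nodes_per_lvl : List Int :=
    (PySem.List.pyRange 0 (full_lvls + 1) 1).map (fun i => (2 : Int) ^ i.toNat)
  let on_last_lvl : Int :=
    PySem.List.pyGetD nodes_per_lvl (-1) 0 - PySem.Int.mod nodes_per_lvl.sum n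
  let counter : Int :=
    (PySem.List.pyRange 0 full_lvls 1).foldl
      (fun c i => c + i * PySem.List.pyGetD nodes_per_lvl i 0) counter
  counter + full_lvls * on_last_lvl

-- ===== PORT B =====
def count_alt (n : Int) : Int :=
  let m : Int := (PySem.Int.bitLength n : Int) - 1
  -- 2**m with m ≥ 0 on Pre_ (n ≥ 1), so 2**m = 2^m.toNat
  let on_last_lvl : Int := (2 : Int) ^ m.toNat - PySem.Int.mod ((2 : Int) ^ (m + 1).toNat - 1) n
  (m - 2) * (2 : Int) ^ m.toNat + 2 + m * on_last_lvl

-- ===== PRECONDITION & SPEC =====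
-- math.log2 raises ValueError on n ≤ 0, so A only returns on n ≥ 1.
def Pre_count (n : Int) : Prop := 1 ≤ n
instance (n : Int) : Decidable (Pre_count n) := by unfold Pre_count; infer_instance

def pvWitness_count : Int := 5

def Spec_count (n : Int) (out : Int) : Prop := out = count_alt n
instance (n : Int) (out : Int) : Decidable (Spec_count n out) := by unfold Spec_count; infer_instance

-- ===== CLAIM (what is proved, stated in full; the proofs are below) =====
def Claim_equal_count : Prop := ∀ (n : Int), Dom_count n → Pre_count n → Spec_count n (count n)

-- ===== LEMMAS AND PROOFS =====

-- bit_length and floor(log2) agree on positive integers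
theorem pvBitLength_eq (N : Nat) (h : 0 < N) :
    PySem.Int.bitLength (N : Int) = pvFloorLog2 N + 1 := by
  induction N using Nat.strong_induction_on with
  | _ N ih =>
    match N, h with
    | 1, _ =>
      have h1 : ((1 : Nat) : Int) = 1 := by norm_num
      rw [h1, show PySem.Int.bitLength 1 = 1 from by decide]
      simp [pvFloorLog2]
    | (k + 2), _ =>
      rw [PySem.Int.bitLength_natCast (show 0 < k + 2 by omega)]
      rw [ih ((k + 2) / 2) (by omega) (by omega)]
      conv_rhs => rw [pvFloorLog2]

-- sum of the full levels: Σ_{k<m} 2^k = 2^m - 1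
theorem pvSumPow (m : Nat) :
    ((List.range m).map (fun k => (2 : Int) ^ k)).sum = 2 ^ m - 1 := by
  induction m with
  | zero => simp
  | succ m ih => rw [List.range_succ]; simp [ih]; ring

-- the weighted sum: Σ_{k<m} k·2^k = (m-2)·2^m + 2
theorem pvWeightedSum (m : Nat) :
    ((PySem.List.pyRange 0 (m : Int) 1).map (fun i => i * (2 : Int) ^ i.toNat)).sum
      = ((m : Int) - 2) * 2 ^ m + 2 := by
  induction m with
  | zero => simp [PySem.List.pyRange_one_eq_nil]
  | succ m ih =>
    have : ((m + 1 : Nat) : Int) = (m : Int) + 1 := by push_cast; ring_nf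
    rw [this, PySem.List.pyRange_one_succ_right (by positivity)]
    simp only [List.map_append, List.sum_append, ih, List.map_cons, List.map_nil,
      List.sum_cons, List.sum_nil, Int.toNat_natCast]
    ring

theorem count_eq_closed (n : Int) (hn : 1 ≤ n) :
    count n = count_alt n := by
  obtain ⟨N, rfl⟩ := Int.eq_ofNat_of_zero_le (by omega : (0 : Int) ≤ n)
  have hN : 0 < N := by exact_mod_cast hn
  set m : Nat := pvFloorLog2 N with hm
  -- A's level list
  have hnodes : (PySem.List.pyRange 0 ((m : Int) + 1) 1).map (fun i => (2 : Int) ^ i.toNat)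
      = ((PySem.List.pyRange 0 ((m : Int)) 1).map (fun i => (2 : Int) ^ i.toNat)) ++ [(2 : Int) ^ m] := by
    rw [PySem.List.pyRange_one_succ_right (by positivity)]
    simp
  have htoNat : (N : Int).toNat = N := Int.toNat_natCast N
  simp only [count, count_alt, htoNat, ← hm]
  rw [hnodes]
  -- last element
  rw [PySem.List.pyGetD_neg_one_append_singleton]
  -- sum of the level list
  have hsum : (((PySem.List.pyRange 0 ((m : Int)) 1).map fun i => (2 : Int) ^ i.toNat) ++ [(2 : Int) ^ m]).sum
      = 2 ^ (m + 1) - 1 := by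
    have : (PySem.List.pyRange 0 ((m : Int)) 1).map (fun i => (2 : Int) ^ i.toNat)
        = (List.range m).map (fun k => (2 : Int) ^ k) := by
      rw [PySem.List.pyRange_zero_nat]
      simp [List.map_map, Function.comp]
    rw [List.sum_append, this, pvSumPow]
    simp; ring
  rw [hsum]
  -- the loop: replace indexing by the closed value, then foldl → sum
  have hloop : (PySem.List.pyRange 0 ((m : Int)) 1).foldl
      (fun c i => c + i * PySem.List.pyGetD
        (((PySem.List.pyRange 0 ((m : Int)) 1).map fun i => (2 : Int) ^ i.toNat) ++ [(2 : Int) ^ m]) i 0) 0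
      = ((m : Int) - 2) * 2 ^ m + 2 := by
    have hcongr : ∀ (acc : Int), ∀ x ∈ PySem.List.pyRange 0 ((m : Int)) 1,
        (fun c i => c + i * PySem.List.pyGetD
          (((PySem.List.pyRange 0 ((m : Int)) 1).map fun i => (2 : Int) ^ i.toNat) ++ [(2 : Int) ^ m]) i 0) acc x
        = (fun c i => c + i * (2 : Int) ^ i.toNat) acc x := by
      intro acc x hx
      rw [PySem.List.mem_pyRange_one] at hx
      simp only
      rw [← hnodes, PySem.List.pyGetD_map_pyRange_of_nonneg (fun i => (2 : Int) ^ i.toNat)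
        ((m : Int) + 1) x 0 hx.1 (by omega)]
    rw [PySem.List.foldl_congr_mem _ _ _ _ hcongr, PySem.List.foldl_add, pvWeightedSum]
    ring
  rw [hloop]
  -- B's m
  rw [pvBitLength_eq N hN, ← hm]
  have h1 : ((m : Int) + 1 - 1) = (m : Int) := by ring
  push_cast
  have h2 : ((m : Int) + 1 - 1).toNat = m := by omega
  have h3 : ((m : Int) + 1 - 1 + 1).toNat = m + 1 := by omega
  rw [h2, h3]
  ring_nf

-- ===== VERDICT (by name: the statement is the Claim_ definition above) =====
theorem count_spec : Claim_equal_count := by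
  intro n _ hpre
  unfold Spec_count
  exact count_eq_closed n hpre
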